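-- pv_equiv track=rewrite | github.com/AlgoConnectSASTRA/Monthly-Contest---February-2024 | Find number of paths/Solution.py | solution
-- ===== SOURCE A (Python) =====
-- def solution(n):
--     mod=int(1e9)+7
--     res=1
--     i=n-2
--     Pathsi=1
--     while(i>0):
--         Pathsi=(Pathsi * i) %mod
--         res=(res+Pathsi)%mod
--         i-=1
--     return res
-- ===== SOURCE B (Python) =====
-- def solution(n):
--     mod = int(1e9) + 7
--     acc = 1
--     i = 1
--     while i <= n - 2:
--         acc = (1 + i * acc) % mod
--         i += 1
--     return acc
-- ===== Notes on version B (the rewrite author's own statement) =====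
-- stated objective: alternative
-- what changed: Replaces the descending product-and-running-sum pair (Pathsi, res) by a single-accumulator ascending Horner fold acc = (1 + i*acc) % mod for i = 1..n-2.
import Mathlib
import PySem

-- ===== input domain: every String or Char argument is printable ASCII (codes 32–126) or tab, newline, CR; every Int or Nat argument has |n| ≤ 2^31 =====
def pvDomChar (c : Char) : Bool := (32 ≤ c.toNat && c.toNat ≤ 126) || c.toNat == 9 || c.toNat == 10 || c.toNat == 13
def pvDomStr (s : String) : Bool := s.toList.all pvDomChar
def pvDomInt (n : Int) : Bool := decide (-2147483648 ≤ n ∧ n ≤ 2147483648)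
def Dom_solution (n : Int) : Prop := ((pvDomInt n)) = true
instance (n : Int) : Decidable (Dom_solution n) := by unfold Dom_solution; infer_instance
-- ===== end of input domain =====

-- B replaces A's descending product-and-sum pair (Pathsi, res) by a single ascending Horner accumulator; alternative decomposition, same O(n) cost.


-- ===== PORT A =====
-- A's while loop: i counts down from n-2, keeping the running product Pathsi and sum res.
def solLoopA (i pathsi res : Int) : Int :=
  if h : i > 0 then
    solLoopA (i - 1) ((pathsi * i) % 1000000007) ((res + (pathsi * i) % 1000000007) % 1000000007)
  else res
termination_by i.toNat
decreasing_by omega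

def solution (n : Int) : Int := solLoopA (n - 2) 1 1

-- ===== PORT B =====
-- B's while loop: i counts up from 1 to n-2 with a single Horner accumulator.
def solLoopB (i n acc : Int) : Int :=
  if h : i ≤ n - 2 then
    solLoopB (i + 1) n ((1 + i * acc) % 1000000007)
  else acc
termination_by (n - 1 - i).toNat
decreasing_by omega

def solution_alt (n : Int) : Int := solLoopB 1 n 1

-- ===== PRECONDITION & SPEC =====
def Spec_solution (n : Int) (out : Int) : Prop := out = solution_alt n
instance (n : Int) (out : Int) : Decidable (Spec_solution n out) := by unfold Spec_solution; infer_instance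

-- ===== CLAIM (what is proved, stated in full; the proofs are below) =====
def Claim_equal_solution : Prop := ∀ (n : Int), Dom_solution n → Spec_solution n (solution n)

-- ===== LEMMAS AND PROOFS =====

-- T k = k + k(k-1) + ... + k!  (the sum of falling factorials of k, unreduced)
def pvT : Nat → Int
  | 0 => 0
  | k + 1 => ((k : Int) + 1) * (1 + pvT k)

-- AccN k = the value of B's accumulator after the updates i = 1..k
def pvAcc : Nat → Int
  | 0 => 1
  | k + 1 => (1 + ((k : Int) + 1) * pvAcc k) % 1000000007

theorem solLoopA_eq (k : Nat) : ∀ q r : Int, 0 ≤ r → r < 1000000007 →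
    solLoopA (k : Int) q r = (r + q * pvT k) % 1000000007 := by
  induction k with
  | zero =>
    intro q r h0 h1
    rw [solLoopA]
    simp [pvT]
    omega
  | succ k ih =>
    intro q r h0 h1
    rw [solLoopA]
    have hpos : ((k : Int) + 1) > 0 := by positivity
    have hc : ((k + 1 : Nat) : Int) > 0 := by push_cast; omega
    rw [dif_pos hc]
    have hstep : ((k + 1 : Nat) : Int) - 1 = (k : Int) := by push_cast; ring
    have hmul : q * ((k + 1 : Nat) : Int) = q * ((k : Int) + 1) := by push_cast; ring
    rw [hstep, hmul]
    set q' := (q * ((k : Int) + 1)) % 1000000007 with hq'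
    have hr0 : (0:Int) ≤ (r + q') % 1000000007 := Int.emod_nonneg _ (by norm_num)
    have hr1 : (r + q') % 1000000007 < 1000000007 := Int.emod_lt_of_pos _ (by norm_num)
    rw [ih _ _ hr0 hr1]
    show ((r + q') % 1000000007 + q' * pvT k) % 1000000007
        = (r + q * pvT (k + 1)) % 1000000007
    have : (r + q') % 1000000007 + q' * pvT k
        ≡ r + q * pvT (k + 1) [ZMOD 1000000007] := by
      calc (r + q') % 1000000007 + q' * pvT k
          ≡ (r + q') + q' * pvT k [ZMOD 1000000007] :=
            Int.ModEq.add (Int.emod_emod_of_dvd _ dvd_rfl) (Int.ModEq.refl _)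
        _ ≡ r + q * pvT (k + 1) [ZMOD 1000000007] := by
            have hqq : q' ≡ q * ((k : Int) + 1) [ZMOD 1000000007] := Int.emod_emod_of_dvd _ dvd_rfl
            calc (r + q') + q' * pvT k
                ≡ (r + q * ((k : Int) + 1)) + (q * ((k : Int) + 1)) * pvT k [ZMOD 1000000007] :=
                  Int.ModEq.add (Int.ModEq.add_left r hqq) (Int.ModEq.mul hqq (Int.ModEq.refl _))
              _ = r + q * pvT (k + 1) := by simp [pvT]; push_cast; ring
    exact this

theorem solLoopB_eq (d : Nat) : ∀ (k : Nat) (n : Int), (k : Int) + d = n - 2 →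
    solLoopB ((k : Int) + 1) n (pvAcc k) = pvAcc (k + d) := by
  induction d with
  | zero =>
    intro k n hk
    rw [solLoopB]
    have : ¬ ((k : Int) + 1 ≤ n - 2) := by omega
    simp [this]
  | succ d ih =>
    intro k n hk
    rw [solLoopB]
    have hc : (k : Int) + 1 ≤ n - 2 := by omega
    rw [dif_pos hc]
    have h1 : (k : Int) + 1 + 1 = ((k + 1 : Nat) : Int) + 1 := by push_cast; ring
    have h2 : (1 + ((k : Int) + 1) * pvAcc k) % 1000000007 = pvAcc (k + 1) := by
      simp [pvAcc]
    rw [h1, h2, ih (k + 1) n (by push_cast at hk ⊢; omega)]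
    congr 1
    omega

theorem pvAcc_eq (k : Nat) : pvAcc k = (1 + pvT k) % 1000000007 := by
  induction k with
  | zero => decide
  | succ k ih =>
    show (1 + ((k : Int) + 1) * pvAcc k) % 1000000007 = (1 + pvT (k + 1)) % 1000000007
    rw [ih]
    have : (1 + ((k : Int) + 1) * ((1 + pvT k) % 1000000007))
        ≡ 1 + pvT (k + 1) [ZMOD 1000000007] := by
      have h : (1 + pvT k) % 1000000007 ≡ 1 + pvT k [ZMOD 1000000007] :=
        Int.emod_emod_of_dvd _ dvd_rfl
      calc 1 + ((k : Int) + 1) * ((1 + pvT k) % 1000000007)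
          ≡ 1 + ((k : Int) + 1) * (1 + pvT k) [ZMOD 1000000007] :=
            Int.ModEq.add_left 1 (Int.ModEq.mul (Int.ModEq.refl _) h)
        _ = 1 + pvT (k + 1) := by simp [pvT]
    exact this

-- ===== VERDICT (by name: the statement is the Claim_ definition above) =====
theorem solution_spec : Claim_equal_solution := by
  intro n _
  unfold Spec_solution solution solution_alt
  by_cases h : 2 ≤ n
  · set k := (n - 2).toNat with hk
    have hcast : ((k : Int)) = n - 2 := by omega
    have hA : solLoopA (n - 2) 1 1 = (1 + 1 * pvT k) % 1000000007 := by
      rw [← hcast]; exact solLoopA_eq k 1 1 (by norm_num) (by norm_num)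
    have hB : solLoopB 1 n 1 = pvAcc k := by
      have := solLoopB_eq k 0 n (by omega)
      simpa [pvAcc] using this
    rw [hA, hB, pvAcc_eq]
    ring_nf
  · rw [solLoopA, solLoopB, dif_neg (show ¬ (n - 2 > 0) by omega),
      dif_neg (show ¬ ((1:Int) ≤ n - 2) by omega)]
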